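-- pv_equiv track=rewrite | github.com/TurkuNLP/squad2-fi | squad2doc.py | make_spans
-- ===== SOURCE A (Python) =====
-- def make_spans(color_map, characters):
--     result = []
--     last_span_lst = None
--     current_text = []
--     for span_lst, c in zip(color_map, characters):
--         if last_span_lst is None or last_span_lst == span_lst:
--             current_text.append(c)
--             last_span_lst = span_lst
--         else:
--             assert last_span_lst is not None and len(current_text) > 0
--             result.append((last_span_lst, "".join(current_text)))
--             last_span_lst = span_lst
--             current_text = [c]
--     else:
--         # I really should have something here
--         assert last_span_lst is not None and len(current_text) > 0
--         result.append((last_span_lst, "".join(current_text)))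
--     return result
-- ===== SOURCE B (Python) =====
-- def make_spans(color_map, characters):
--     pairs = list(zip(color_map, characters))
--     out = []
--     i = 0
--     n = len(pairs)
--     while i < n:
--         k = pairs[i][0]
--         j = i + 1
--         while j < n and pairs[j][0] == k:
--             j += 1
--         out.append((k, "".join(c for _, c in pairs[i:j])))
--         i = j
--     return out
-- ===== Notes on version B (the rewrite author's own statement) =====
-- stated objective: alternative
-- what changed: Replaces A's single pass with a last-label/current-text accumulator and branch by a two-pointer run scanner: an inner scan finds the end of each run of equal labels and one (label, joined-chars) tuple is emitted per run directly from the slice.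
import Mathlib
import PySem

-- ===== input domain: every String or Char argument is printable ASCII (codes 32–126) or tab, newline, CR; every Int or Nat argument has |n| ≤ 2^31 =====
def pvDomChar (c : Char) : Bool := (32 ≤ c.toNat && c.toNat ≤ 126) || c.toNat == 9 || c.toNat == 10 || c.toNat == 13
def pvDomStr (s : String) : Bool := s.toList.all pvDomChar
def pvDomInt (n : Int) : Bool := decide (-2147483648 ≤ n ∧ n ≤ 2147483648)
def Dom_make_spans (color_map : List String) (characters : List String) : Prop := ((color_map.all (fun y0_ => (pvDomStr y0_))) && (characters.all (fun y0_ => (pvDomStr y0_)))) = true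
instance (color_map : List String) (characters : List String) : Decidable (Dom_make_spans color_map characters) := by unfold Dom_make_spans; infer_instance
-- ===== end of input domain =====

-- B groups the zipped pairs by a two-pointer run scanner (one tuple per run of equal
-- labels) instead of A's last-label/current-text accumulator loop; objective: alternative.
-- On an empty zip A's for-else assertion raises AssertionError (excluded by Pre_), B returns [].

-- ===== PORT A =====
-- A's for-loop over zip(color_map, characters), state (result, last_span_lst, current_text),
-- as structural recursion.  In the empty-`last` final case Python's `assert` RAISES; the
-- port returns [] there — that input is excluded by Pre_make_spans.
def make_spans_loop : List (String × String) → List (String × String) → Option String → List String → List (String × String)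
  | [], result, last, cur =>
    match last with
    | none => []  -- Python raises AssertionError here (outside Pre_)
    | some k => result ++ [(k, PySem.Str.join "" cur)]
  | (s, c) :: rest, result, last, cur =>
    match last with
    | none => make_spans_loop rest result (some s) (cur ++ [c])
    | some k =>
      if k == s then make_spans_loop rest result (some s) (cur ++ [c])
      else make_spans_loop rest (result ++ [(k, PySem.Str.join "" cur)]) (some s) [c]

def make_spans (color_map : List String) (characters : List String) : List (String × String) :=
  make_spans_loop (List.zip color_map characters) [] none []

-- ===== PORT B =====
-- B's outer loop emits one tuple per run; the inner `while pairs[j][0] == k` scan that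
-- finds the run's end is takeWhile/dropWhile on the remaining pairs.
def make_spans_alt_runs : List (String × String) → List (String × String)
  | [] => []
  | (k, c) :: rest =>
    let run := rest.takeWhile (fun p => p.1 == k)
    (k, PySem.Str.join "" (c :: run.map Prod.snd)) ::
      make_spans_alt_runs (rest.dropWhile (fun p => p.1 == k))
termination_by l => l.length
decreasing_by
  simp only [List.length_cons]
  exact Nat.lt_succ_of_le (List.length_dropWhile_le _ _)

def make_spans_alt (color_map : List String) (characters : List String) : List (String × String) :=
  make_spans_alt_runs (List.zip color_map characters)

-- ===== PRECONDITION & SPEC =====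
-- Pre_ excludes exactly the inputs on which A raises: an empty zip, i.e. either list empty.
def Pre_make_spans (color_map : List String) (characters : List String) : Prop :=
  color_map ≠ [] ∧ characters ≠ []
instance (color_map : List String) (characters : List String) : Decidable (Pre_make_spans color_map characters) := by unfold Pre_make_spans; infer_instance
def pvWitness_make_spans : List String × List String := (["a", "a", "b"], ["x", "y", "z"])

def Spec_make_spans (color_map : List String) (characters : List String) (out : List (String × String)) : Prop := out = make_spans_alt color_map characters
instance (color_map : List String) (characters : List String) (out : List (String × String)) : Decidable (Spec_make_spans color_map characters out) := by unfold Spec_make_spans; infer_instance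

-- ===== CLAIM (what is proved, stated in full; the proofs are below) =====
def Claim_equal_make_spans : Prop := ∀ (color_map : List String) (characters : List String), Dom_make_spans color_map characters → Pre_make_spans color_map characters → Spec_make_spans color_map characters (make_spans color_map characters)

-- ===== LEMMAS AND PROOFS =====

-- A's loop with an open current run (label k, accumulated text cur) produces the already
-- emitted result, then the completed current run, then B's runs of what is left.
theorem make_spans_loop_some (l : List (String × String)) :
    ∀ (result : List (String × String)) (k : String) (cur : List String),
    make_spans_loop l result (some k) cur =
      result ++
        (k, PySem.Str.join "" (cur ++ (l.takeWhile (fun p => p.1 == k)).map Prod.snd)) ::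
        make_spans_alt_runs (l.dropWhile (fun p => p.1 == k)) := by
  induction l with
  | nil => intro result k cur; simp [make_spans_loop, make_spans_alt_runs]
  | cons p rest ih =>
    intro result k cur
    obtain ⟨s, c⟩ := p
    by_cases h : k == s
    · have hs : s = k := ((beq_iff_eq).mp h).symm
      subst hs
      simp only [make_spans_loop, h, if_pos]
      rw [ih]
      simp [List.takeWhile, List.dropWhile, List.append_assoc]
    · simp only [make_spans_loop, h, if_neg, Bool.false_eq_true, not_false_iff]
      rw [ih]
      have hks : (s == k) = false :=
        beq_eq_false_iff_ne.mpr (fun hsk => h (beq_iff_eq.mpr hsk.symm))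
      rw [List.takeWhile_cons, List.dropWhile_cons]
      conv_rhs => rw [make_spans_alt_runs.eq_def]
      simp [hks, List.append_assoc]

theorem make_spans_loop_eq_runs (l : List (String × String)) (hl : l ≠ []) :
    make_spans_loop l [] none [] = make_spans_alt_runs l := by
  match l with
  | [] => exact absurd rfl hl
  | (s, c) :: rest =>
    simp only [make_spans_loop]
    rw [make_spans_loop_some]
    rw [make_spans_alt_runs]
    simp

-- ===== VERDICT (by name: the statement is the Claim_ definition above) =====
theorem make_spans_spec : Claim_equal_make_spans := by
  intro color_map characters _ hpre
  unfold Spec_make_spans make_spans make_spans_alt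
  apply make_spans_loop_eq_runs
  obtain ⟨h1, h2⟩ := hpre
  cases color_map with
  | nil => exact absurd rfl h1
  | cons a as =>
    cases characters with
    | nil => exact absurd rfl h2
    | cons b bs => simp [List.zip]
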